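-- pv_equiv track=rewrite | github.com/phrugsa-limbunlom/CE156_Coursework_Autumn_2023 | Exercise3/exercise3.py | fun2
-- ===== SOURCE A (Python) =====
-- def fun2(word):
--     word = word.lower()
--     word_frequency = dict()
--     count = 0
--     for w in word:
--         if w.isdigit() or w.isalpha():
--             if w not in word_frequency:
--                 word_frequency[w] = 1
--             else:
--                 word_frequency[w] = word_frequency[w] + 1
--             count += 1
--     if count == 0:
--         return None
--
--     character_maximum_frequency = [word[0] for word in word_frequency.items() if word[1] == max(word_frequency.values())]
--
--     return character_maximum_frequency[len(character_maximum_frequency)-1]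
-- ===== SOURCE B (Python) =====
-- def fun2(word):
--     freq = {}
--     for w in word.lower():
--         if w.isdigit() or w.isalpha():
--             freq[w] = freq.get(w, 0) + 1
--     best = None
--     best_count = 0
--     for ch, c in freq.items():
--         if c >= best_count:
--             best = ch
--             best_count = c
--     return best
-- ===== Notes on version B (the rewrite author's own statement) =====
-- stated objective: simpler
-- what changed: Replaces the list comprehension that recomputes max(values) per item plus the trailing [len-1] index by a single scan over the counted items keeping a running best with >= (so later insertion-order chars win ties), and drops the separate count variable (None exactly when the dict is empty).
import Mathlib
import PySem

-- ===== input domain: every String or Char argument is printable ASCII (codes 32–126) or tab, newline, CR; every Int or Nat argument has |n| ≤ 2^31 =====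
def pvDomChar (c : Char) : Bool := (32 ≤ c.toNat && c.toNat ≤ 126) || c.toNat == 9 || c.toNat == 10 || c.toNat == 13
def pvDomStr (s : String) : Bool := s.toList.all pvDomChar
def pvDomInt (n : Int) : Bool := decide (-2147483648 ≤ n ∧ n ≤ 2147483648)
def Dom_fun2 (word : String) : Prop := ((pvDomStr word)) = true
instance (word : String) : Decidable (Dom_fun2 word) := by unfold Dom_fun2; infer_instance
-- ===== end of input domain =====

-- B replaces A's repeated-max list comprehension and [len-1] index by one running-best scan
-- over the counted items (objective: simpler).

-- ===== PORT A =====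
def fun2 (word : String) : Option String :=
  let wl := PySem.Chars.lower word.toList
  let st := wl.foldl
    (fun (st : PySem.Dict Char Int × Int) w =>
      if PySem.Chars.isdigit w || PySem.Chars.isalpha w then
        (if st.1.contains w = false then st.1.insert w 1
         else st.1.insert w (st.1.getD w 0 + 1),
         st.2 + 1)
      else st)
    (PySem.Dict.empty, 0)
  if st.2 = 0 then none
  else
    let cmf := (st.1.items.filter (fun p =>
        match PySem.List.max? st.1.values id with
        | some m => p.2 == m
        | none => false)).map (·.1)
    (PySem.List.pyGet? cmf ((cmf.length : Int) - 1)).map (fun c => String.ofList [c])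

-- ===== PORT B =====
def fun2_alt (word : String) : Option String :=
  let freq := (PySem.Chars.lower word.toList).foldl
    (fun (d : PySem.Dict Char Int) w =>
      if PySem.Chars.isdigit w || PySem.Chars.isalpha w then d.insert w (d.getD w 0 + 1)
      else d)
    PySem.Dict.empty
  let best := freq.items.foldl
    (fun (st : Option Char × Int) p => if st.2 ≤ p.2 then (some p.1, p.2) else st)
    (none, 0)
  best.1.map (fun c => String.ofList [c])

-- ===== PRECONDITION & SPEC =====
def Spec_fun2 (word : String) (out : Option String) : Prop := out = fun2_alt word
instance (word : String) (out : Option String) : Decidable (Spec_fun2 word out) := by unfold Spec_fun2; infer_instance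

-- ===== CLAIM (what is proved, stated in full; the proofs are below) =====
def Claim_equal_fun2 : Prop := ∀ (word : String), Dom_fun2 word → Spec_fun2 word (fun2 word)

-- ===== LEMMAS AND PROOFS =====

-- a loop that skips non-matching elements is a loop over the filtered list
theorem foldl_if_filter {σ : Type} (p : Char → Bool) (f : σ → Char → σ) :
    ∀ (l : List Char) (init : σ),
      l.foldl (fun s w => if p w then f s w else s) init = (l.filter p).foldl f init := by
  intro l
  induction l with
  | nil => intro init; rfl
  | cons a t ih =>
    intro init
    by_cases h : p a = true
    · simp [List.foldl_cons, h, ih]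
    · simp only [Bool.not_eq_true] at h
      simp [List.foldl_cons, h, ih]

-- A's counting loop: the dict part is B's counting step, the count part adds the length
theorem foldA_eq (xs : List Char) :
    ∀ (d : PySem.Dict Char Int) (c : Int),
      xs.foldl
        (fun (st : PySem.Dict Char Int × Int) w =>
          (if st.1.contains w = false then st.1.insert w 1
           else st.1.insert w (st.1.getD w 0 + 1),
           st.2 + 1))
        (d, c)
      = (xs.foldl (fun d w => d.insert w (d.getD w 0 + 1)) d, c + xs.length) := by
  induction xs with
  | nil => intro d c; simp
  | cons a t ih =>
    intro d c
    have hd : (if d.contains a = false then d.insert a 1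
               else d.insert a (d.getD a 0 + 1)) = d.insert a (d.getD a 0 + 1) := by
      by_cases h : d.contains a = true
      · simp [h]
      · simp only [Bool.not_eq_true] at h
        rw [PySem.Dict.getD_of_not_contains d 0 h]
        simp [h]
    simp only [List.foldl_cons, hd, ih]
    simp [List.length_cons]
    omega

-- a fold that maps some-states to some-states stays some
theorem foldl_some_isSome (g : Option Int → Int → Option Int)
    (hg : ∀ a x, (g (some a) x).isSome = true) :
    ∀ (t : List Int) (a : Int), (t.foldl g (some a)).isSome = true := by
  intro t
  induction t with
  | nil => intro a; rfl
  | cons b t ih =>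
    intro a
    rw [List.foldl_cons]
    obtain ⟨c, hc⟩ := Option.isSome_iff_exists.mp (hg a b)
    rw [hc]
    exact ih c

-- max? of a nonempty Int list is some value
theorem max?_isSome (vs : List Int) (h : vs ≠ []) :
    ∃ m, PySem.List.max? vs id = some m := by
  match vs, h with
  | a :: t, _ =>
    apply Option.isSome_iff_exists.mp
    show (t.foldl _ (some a)).isSome = true
    apply foldl_some_isSome
    intro a x
    by_cases hx : a < x <;> simp [hx]

-- the running-best scan computes "last key whose value is the maximum value"
theorem selFold (l : List (Char × Int)) (h : ∀ p ∈ l, 1 ≤ p.2) :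
    l.foldl (fun (st : Option Char × Int) p => if st.2 ≤ p.2 then (some p.1, p.2) else st)
      (none, 0)
    = match PySem.List.max? (l.map (·.2)) id with
      | none => (none, 0)
      | some m => (((l.filter (fun p => p.2 == m)).map (·.1)).getLast?, m) := by
  induction l using List.reverseRecOn with
  | nil => rfl
  | append_singleton l p ih =>
    have hp : 1 ≤ p.2 := h p (by simp)
    have hl : ∀ q ∈ l, 1 ≤ q.2 := fun q hq => h q (by simp [hq])
    rw [List.foldl_append]
    by_cases hnil : l = []
    · subst hnil
      simp only [List.foldl_nil, List.nil_append]
      have h0 : (0 : Int) ≤ p.2 := by omega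
      simp [PySem.List.max?, h0]
    · obtain ⟨m, hm⟩ := max?_isSome (l.map (·.2)) (by simpa using hnil)
      have hmax_app : PySem.List.max? ((l ++ [p]).map (·.2)) id
          = if m < p.2 then some p.2 else some m := by
        simp only [List.map_append, List.map_cons, List.map_nil, PySem.List.max?,
          List.foldl_append, List.foldl_cons, List.foldl_nil]
        simp only [PySem.List.max?] at hm
        rw [hm]
        simp [id]
      rw [ih hl, hm, hmax_app]
      by_cases hlt : m < p.2
      · have hle : m ≤ p.2 := le_of_lt hlt
        rw [if_pos hlt]
        have hfp : (l ++ [p]).filter (fun q => q.2 == p.2)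
            = l.filter (fun q => q.2 == p.2) ++ [p] := by
          simp [List.filter_append]
        simp only [hfp, List.map_append, List.map_cons, List.map_nil, List.getLast?_concat]
        simp [hle]
      · by_cases heq : p.2 = m
        · rw [if_neg hlt]
          have hfp : (l ++ [p]).filter (fun q => q.2 == m)
              = l.filter (fun q => q.2 == m) ++ [p] := by
            simp [List.filter_append, heq]
          simp only [hfp, List.map_append, List.map_cons, List.map_nil, List.getLast?_concat]
          simp [heq]
        · have hnle : ¬ m ≤ p.2 := by omega
          rw [if_neg hlt]
          have hfp : (l ++ [p]).filter (fun q => q.2 == m)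
              = l.filter (fun q => q.2 == m) := by
            simp [List.filter_append, heq]
          simp only [hfp]
          simp [hnle]

-- xs[len(xs)-1] with Python indexing is getLast?
theorem pyGet?_len_sub_one (l : List Char) :
    PySem.List.pyGet? l ((l.length : Int) - 1) = l.getLast? := by
  cases l with
  | nil => rfl
  | cons a t =>
    have hlen : (((a :: t).length : Int)) - 1 = ((t.length : Nat) : Int) := by
      simp
    rw [hlen]
    simp [PySem.List.pyGet?, PySem.List.pyIdx?, List.getLast?_eq_getElem?]

theorem fun2_eq_alt (word : String) : fun2 word = fun2_alt word := by
  unfold fun2 fun2_alt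
  dsimp only
  rw [foldl_if_filter (fun w => PySem.Chars.isdigit w || PySem.Chars.isalpha w) _
        (PySem.Chars.lower word.toList) (PySem.Dict.empty, (0 : Int)),
      foldl_if_filter (fun w => PySem.Chars.isdigit w || PySem.Chars.isalpha w) _
        (PySem.Chars.lower word.toList) PySem.Dict.empty,
      foldA_eq, PySem.Dict.foldl_insert_getD_add_one_eq_counter]
  dsimp only
  by_cases hnil : (PySem.Chars.lower word.toList).filter
      (fun w => PySem.Chars.isdigit w || PySem.Chars.isalpha w) = []
  · rw [hnil]
    rfl
  · have hitems := PySem.Dict.items_counter ((PySem.Chars.lower word.toList).filter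
      (fun w => PySem.Chars.isdigit w || PySem.Chars.isalpha w))
    have hvals : ∀ p ∈ (PySem.Dict.counter ((PySem.Chars.lower word.toList).filter
        (fun w => PySem.Chars.isdigit w || PySem.Chars.isalpha w))).items, 1 ≤ p.2 := by
      intro p hp
      rw [hitems] at hp
      obtain ⟨k, hk, rfl⟩ := List.mem_map.mp hp
      have hmem : k ∈ (PySem.Chars.lower word.toList).filter
          (fun w => PySem.Chars.isdigit w || PySem.Chars.isalpha w) :=
        (PySem.Set.mem_ofList _ k).mp hk
      have h1 : 1 ≤ ((PySem.Chars.lower word.toList).filter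
          (fun w => PySem.Chars.isdigit w || PySem.Chars.isalpha w)).count k :=
        List.one_le_count_iff.mpr hmem
      show (1 : Int) ≤ ((((PySem.Chars.lower word.toList).filter
          (fun w => PySem.Chars.isdigit w || PySem.Chars.isalpha w)).count k : Nat) : Int)
      exact_mod_cast h1
    have hcount : ¬ ((0 : Int) + (((PySem.Chars.lower word.toList).filter
        (fun w => PySem.Chars.isdigit w || PySem.Chars.isalpha w)).length : Int) = 0) := by
      have hne : ((PySem.Chars.lower word.toList).filter
          (fun w => PySem.Chars.isdigit w || PySem.Chars.isalpha w)).length ≠ 0 := by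
        simpa using hnil
      omega
    rw [if_neg hcount]
    have hvne : (PySem.Dict.counter ((PySem.Chars.lower word.toList).filter
        (fun w => PySem.Chars.isdigit w || PySem.Chars.isalpha w))).items.map (·.2) ≠ [] := by
      obtain ⟨a, ha⟩ := List.exists_mem_of_ne_nil _ hnil
      have h1 := (PySem.Set.mem_ofList ((PySem.Chars.lower word.toList).filter
        (fun w => PySem.Chars.isdigit w || PySem.Chars.isalpha w)) a).mpr ha
      have h2 : (a, ((((PySem.Chars.lower word.toList).filter
          (fun w => PySem.Chars.isdigit w || PySem.Chars.isalpha w)).count a : Nat) : Int))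
          ∈ (PySem.Dict.counter ((PySem.Chars.lower word.toList).filter
            (fun w => PySem.Chars.isdigit w || PySem.Chars.isalpha w))).items := by
        rw [hitems]
        exact List.mem_map.mpr ⟨a, h1, rfl⟩
      exact List.ne_nil_of_mem (List.mem_map.mpr ⟨_, h2, rfl⟩)
    obtain ⟨m, hm⟩ := max?_isSome _ hvne
    have hmv : PySem.List.max? (PySem.Dict.counter ((PySem.Chars.lower word.toList).filter
        (fun w => PySem.Chars.isdigit w || PySem.Chars.isalpha w))).values id = some m := by
      simpa [PySem.Dict.values] using hm
    rw [selFold _ hvals, hm]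
    simp only [hmv]
    rw [pyGet?_len_sub_one]

-- ===== VERDICT (by name: the statement is the Claim_ definition above) =====
theorem fun2_spec : Claim_equal_fun2 := by
  intro word _
  unfold Spec_fun2
  exact fun2_eq_alt word
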